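-- pv_equiv track=rewrite | github.com/KevZCodehub/TextWise | app.py | find_next_sentence_index
-- ===== SOURCE A (Python) =====
-- def find_next_sentence_index(text):
--     sentence_endings = [". ", "? ", "! "]
--     min_index = -1
--     for ending in sentence_endings:
--         index = text.find(ending)
--         if index != -1 and (min_index == -1 or index < min_index):
--             min_index = index
--     return min_index
-- ===== SOURCE B (Python) =====
-- def find_next_sentence_index(text):
--     # Single left-to-right scan: return the first index whose 2-char window
--     # is one of ". ", "? ", "! "; -1 if none.
--     for i in range(len(text) - 1):
--         if text[i + 1] == ' ' and text[i] in '.?!':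
--             return i
--     return -1
-- ===== Notes on version B (the rewrite author's own statement) =====
-- stated objective: alternative
-- what changed: Replaces three separate substring searches plus a running minimum with one left-to-right scan that returns at the first two-char sentence-ending window.
import Mathlib
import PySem

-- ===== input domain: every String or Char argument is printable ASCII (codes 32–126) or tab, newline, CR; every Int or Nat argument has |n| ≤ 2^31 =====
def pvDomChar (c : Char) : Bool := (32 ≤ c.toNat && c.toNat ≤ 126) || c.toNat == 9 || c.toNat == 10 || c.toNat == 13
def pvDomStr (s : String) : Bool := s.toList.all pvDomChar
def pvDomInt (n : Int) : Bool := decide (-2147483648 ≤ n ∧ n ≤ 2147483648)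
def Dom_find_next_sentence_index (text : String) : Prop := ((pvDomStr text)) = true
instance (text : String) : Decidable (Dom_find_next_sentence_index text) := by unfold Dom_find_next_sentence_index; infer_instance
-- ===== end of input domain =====

-- B replaces A's three substring searches + running minimum with one left-to-right
-- scan stopping at the first two-char sentence-ending window (alternative decomposition).


-- ===== PORT A =====
def find_next_sentence_index (text : String) : Int :=
  let sentence_endings := [". ", "? ", "! "]
  sentence_endings.foldl
    (fun min_index ending =>
      let index := PySem.Str.find text ending
      if index ≠ -1 ∧ (min_index = -1 ∨ index < min_index) then index else min_index)
    (-1)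

-- ===== PORT B =====
-- the loop 'for i in range(len(text)-1): if text[i+1]==' ' and text[i] in '.?!': return i'
-- as structural recursion over the character list, carrying the index i
def pvScanB : List Char → Int → Int
  | a :: b :: rest, i =>
      if b = ' ' ∧ (a = '.' ∨ a = '?' ∨ a = '!') then i else pvScanB (b :: rest) (i + 1)
  | _, _ => -1

def find_next_sentence_index_alt (text : String) : Int :=
  pvScanB text.toList 0

-- ===== PRECONDITION & SPEC =====
def Spec_find_next_sentence_index (text : String) (out : Int) : Prop := out = find_next_sentence_index_alt text
instance (text : String) (out : Int) : Decidable (Spec_find_next_sentence_index text out) := by unfold Spec_find_next_sentence_index; infer_instance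

-- ===== CLAIM (what is proved, stated in full; the proofs are below) =====
def Claim_equal_find_next_sentence_index : Prop := ∀ (text : String), Dom_find_next_sentence_index text → Spec_find_next_sentence_index text (find_next_sentence_index text)

-- ===== LEMMAS AND PROOFS =====

-- 'a two-char sentence ending starts at position j of l'
def pvHit (l : List Char) (j : Nat) : Prop :=
  ['.', ' '] <+: l.drop j ∨ ['?', ' '] <+: l.drop j ∨ ['!', ' '] <+: l.drop j

-- 'v is the first index satisfying P, or -1 if none'
def pvFirst (P : Nat → Prop) (v : Int) : Prop :=
  (v = -1 ∧ ∀ j, ¬ P j) ∨ (0 ≤ v ∧ P v.toNat ∧ ∀ j < v.toNat, ¬ P j)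

lemma pvFirst_unique {P : Nat → Prop} {v w : Int} (hv : pvFirst P v) (hw : pvFirst P w) :
    v = w := by
  rcases hv with ⟨hv1, hv2⟩ | ⟨hv0, hvP, hvmin⟩
  · rcases hw with ⟨hw1, _⟩ | ⟨hw0, hwP, _⟩
    · omega
    · exact absurd hwP (hv2 _)
  · rcases hw with ⟨hw1, hw2⟩ | ⟨hw0, hwP, hwmin⟩
    · exact absurd hvP (hw2 _)
    · have h1 : ¬ v.toNat < w.toNat := fun h => hwmin _ h hvP
      have h2 : ¬ w.toNat < v.toNat := fun h => hvmin _ h hwP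
      omega

lemma pvFirst_iff {P Q : Nat → Prop} {v : Int} (h : ∀ j, P j ↔ Q j) (hv : pvFirst P v) :
    pvFirst Q v := by
  rcases hv with ⟨h1, h2⟩ | ⟨h0, hP, hmin⟩
  · exact Or.inl ⟨h1, fun j hj => h2 j ((h j).mpr hj)⟩
  · exact Or.inr ⟨h0, (h _).mp hP, fun j hj hQ => hmin j hj ((h j).mpr hQ)⟩

-- A-side: Chars.find of a nonempty pattern is the first index where it is a prefix of the drop
lemma pvFirst_find (l p : List Char) (_hp : p ≠ []) :
    pvFirst (fun j => p <+: l.drop j) (PySem.Chars.find l p) := by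
  by_cases h : PySem.Chars.find l p = -1
  · left
    refine ⟨h, fun j hj => ?_⟩
    have hinf : ¬ p <:+: l := (PySem.Chars.find_eq_neg_one_iff l p).mp h
    have : PySem.Chars.isIn p l = true :=
      (PySem.Chars.exists_prefix_drop_iff_isIn p l).mp ⟨j, hj⟩
    exact hinf ((PySem.Chars.isIn_iff_infix p l).mp this)
  · right
    have h0 : 0 ≤ PySem.Chars.find l p := by
      have := PySem.Chars.neg_one_le_find l p
      omega
    obtain ⟨h1, h2⟩ := PySem.Chars.find_spec h0
    exact ⟨h0, h1, h2⟩

-- combining step of A's fold preserves the 'first index' characterisation under disjunction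
lemma pvFirst_step {P Q : Nat → Prop} {v w : Int}
    (hv : pvFirst P v) (hw : pvFirst Q w) :
    pvFirst (fun j => P j ∨ Q j)
      (if w ≠ -1 ∧ (v = -1 ∨ w < v) then w else v) := by
  rcases hv with ⟨hv1, hv2⟩ | ⟨hv0, hvP, hvmin⟩ <;>
    rcases hw with ⟨hw1, hw2⟩ | ⟨hw0, hwP, hwmin⟩
  · simp only [hw1, ne_eq, not_true_eq_false, false_and, if_false]
    exact Or.inl ⟨hv1, fun j hj => hj.elim (hv2 j) (hw2 j)⟩
  · have : w ≠ -1 ∧ (v = -1 ∨ w < v) := ⟨by omega, Or.inl hv1⟩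
    rw [if_pos this]
    exact Or.inr ⟨hw0, Or.inr hwP, fun j hj h => h.elim (hv2 j) (hwmin j hj)⟩
  · have : ¬ (w ≠ -1 ∧ (v = -1 ∨ w < v)) := by
      intro ⟨h1, _⟩; exact h1 hw1
    rw [if_neg this]
    exact Or.inr ⟨hv0, Or.inl hvP, fun j hj h => h.elim (hvmin j hj) (hw2 j)⟩
  · by_cases hlt : w < v
    · rw [if_pos ⟨by omega, Or.inr hlt⟩]
      refine Or.inr ⟨hw0, Or.inr hwP, fun j hj h => ?_⟩
      exact h.elim (fun hP => hvmin j (by omega) hP) (hwmin j hj)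
    · rw [if_neg (by omega)]
      refine Or.inr ⟨hv0, Or.inl hvP, fun j hj h => ?_⟩
      exact h.elim (hvmin j hj) (fun hQ => hwmin j (by omega) hQ)

-- B-side: the scan returns i + (first hit index), or -1 if there is none
lemma pvScanB_spec (l : List Char) (i : Int) :
    (pvScanB l i = -1 ∧ ∀ j, ¬ pvHit l j) ∨
    (∃ j : Nat, pvScanB l i = i + (j : Int) ∧ pvHit l j ∧ ∀ j' < j, ¬ pvHit l j') := by
  induction l generalizing i with
  | nil =>
    left
    refine ⟨rfl, fun j hj => ?_⟩
    rcases hj with h | h | h <;> simp at h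
  | cons a t ih =>
    match t with
    | [] =>
      left
      refine ⟨rfl, fun j hj => ?_⟩
      have hlen : ([a].drop j).length ≤ 1 := by
        simp
      rcases hj with h | h | h <;>
        · have := h.length_le; simp at this; omega
    | b :: rest =>
      have hdropsucc : ∀ (j : Nat), (a :: b :: rest).drop (j + 1) = (b :: rest).drop j := by
        intro j; simp
      have hhitsucc : ∀ (j : Nat), pvHit (a :: b :: rest) (j + 1) ↔ pvHit (b :: rest) j := by
        intro j; unfold pvHit; rw [hdropsucc]
      by_cases hc : b = ' ' ∧ (a = '.' ∨ a = '?' ∨ a = '!')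
      · right
        refine ⟨0, ?_, ?_, by omega⟩
        · show pvScanB (a :: b :: rest) i = i + 0
          rw [pvScanB, if_pos hc]; ring
        · obtain ⟨hb, ha⟩ := hc
          rcases ha with ha | ha | ha <;>
            · subst ha; subst hb
              unfold pvHit
              simp [List.cons_prefix_cons]
      · have hstep : pvScanB (a :: b :: rest) i = pvScanB (b :: rest) (i + 1) := by
          rw [pvScanB, if_neg hc]
        have hhit0 : ¬ pvHit (a :: b :: rest) 0 := by
          unfold pvHit
          simp only [List.drop_zero, List.cons_prefix_cons, List.nil_prefix, and_true]
          rintro (⟨ha, hb⟩ | ⟨ha, hb⟩ | ⟨ha, hb⟩)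
          · exact hc ⟨hb.symm, Or.inl ha.symm⟩
          · exact hc ⟨hb.symm, Or.inr (Or.inl ha.symm)⟩
          · exact hc ⟨hb.symm, Or.inr (Or.inr ha.symm)⟩
        rcases ih (i + 1) with ⟨h1, h2⟩ | ⟨j, h1, h2, h3⟩
        · left
          refine ⟨hstep.trans h1, fun j hj => ?_⟩
          match j with
          | 0 => exact hhit0 hj
          | j + 1 => exact h2 j ((hhitsucc j).mp hj)
        · right
          refine ⟨j + 1, ?_, (hhitsucc j).mpr h2, fun j' hj' => ?_⟩
          · rw [hstep, h1]; push_cast; ring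
          · match j' with
            | 0 => exact hhit0
            | j'' + 1 => exact fun h => h3 j'' (by omega) ((hhitsucc j'').mp h)

lemma pvScanB_first (l : List Char) : pvFirst (pvHit l) (pvScanB l 0) := by
  rcases pvScanB_spec l 0 with ⟨h1, h2⟩ | ⟨j, h1, h2, h3⟩
  · exact Or.inl ⟨h1, h2⟩
  · right
    refine ⟨by omega, ?_, fun j' hj' => ?_⟩
    · have : (pvScanB l 0).toNat = j := by omega
      rwa [this]
    · have : (pvScanB l 0).toNat = j := by omega
      exact h3 j' (by omega)

lemma pvA_first (text : String) :
    pvFirst (pvHit text.toList) (find_next_sentence_index text) := by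
  have h1 : pvFirst (fun j => ['.', ' '] <+: text.toList.drop j) (PySem.Str.find text ". ") := by
    rw [PySem.Str.find_eq]
    exact pvFirst_find text.toList ['.', ' '] (by simp)
  have h2 : pvFirst (fun j => ['?', ' '] <+: text.toList.drop j) (PySem.Str.find text "? ") := by
    rw [PySem.Str.find_eq]
    exact pvFirst_find text.toList ['?', ' '] (by simp)
  have h3 : pvFirst (fun j => ['!', ' '] <+: text.toList.drop j) (PySem.Str.find text "! ") := by
    rw [PySem.Str.find_eq]
    exact pvFirst_find text.toList ['!', ' '] (by simp)
  have hstart : pvFirst (fun _ : Nat => False) (-1 : Int) :=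
    Or.inl ⟨rfl, fun _ h => h⟩
  have s3 := pvFirst_step (pvFirst_step (pvFirst_step hstart h1) h2) h3
  have hiff : ∀ j : Nat,
      (((False ∨ ['.', ' '] <+: List.drop j text.toList) ∨ ['?', ' '] <+: List.drop j text.toList) ∨
        ['!', ' '] <+: List.drop j text.toList) ↔ pvHit text.toList j := by
    intro j; unfold pvHit; tauto
  exact pvFirst_iff hiff s3

-- ===== VERDICT (by name: the statement is the Claim_ definition above) =====
theorem find_next_sentence_index_spec : Claim_equal_find_next_sentence_index := by
  intro text _
  unfold Spec_find_next_sentence_index find_next_sentence_index_alt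
  exact pvFirst_unique (pvA_first text) (pvScanB_first text.toList)
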